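-- pv_equiv track=rewrite | github.com/SasCezar/KeBaSiC | kebasic/feature/textrank.py | postprocessing_key_phrases
-- ===== SOURCE A (Python) =====
-- def postprocessing_key_phrases(keyphrases, textlist):
--     """
--     Take keyphrases with multiple words into consideration as done in the paper.
--     If two words are adjacent in the text and are selected as keywords, join them together
--
--     :param keyphrases:
--     :param textlist:
--     :return:
--     """
--     modified_key_phrases = set([])
--     # keeps track of individual keywords that have been joined to form a keyphrase
--     dealt_with = set([])
--     i = 0
--     j = 1
--     while j < len(textlist):
--         first = textlist[i]
--         second = textlist[j]
--         if first in keyphrases and second in keyphrases: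
--             keyphrase = first + ' ' + second
--             modified_key_phrases.add(keyphrase)
--             dealt_with.add(first)
--             dealt_with.add(second)
--         else:
--             if first in keyphrases and first not in dealt_with:
--                 modified_key_phrases.add(first)
--
--             # if this is the last word in the text, and it is a keyword, it
--             # definitely has no chance of being a keyphrase at this point
--             if j == len(textlist) - 1 and second in keyphrases and second not in dealt_with:
--                 modified_key_phrases.add(second)
--
--         i = i + 1
--         j = j + 1
--
--     return modified_key_phrases
-- ===== SOURCE B (Python) =====
-- def postprocessing_key_phrases(keyphrases, textlist):
--     """Staged re-implementation: precompute the keyword flags, the adjacent-keyword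
--     pair positions, and a map from each joined word value to the earliest pair that
--     uses it; then classify every position independently: emit the bigram at a pair
--     start, or the word alone when it is an isolated keyword not joined by any earlier
--     pair (the precomputed map replaces A's running dealt_with set)."""
--     n = len(textlist)
--     flags = [w in keyphrases for w in textlist]
--     pairs = [k for k in range(n - 1) if flags[k] and flags[k + 1]]
--     first_join = {}
--     for k in pairs:
--         first_join.setdefault(textlist[k], k)
--         first_join.setdefault(textlist[k + 1], k)
--     result = set()
--     for i in range(n):
--         if not flags[i]:
--             continue
--         if i + 1 < n and flags[i + 1]:
--             result.add(textlist[i] + ' ' + textlist[i + 1])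
--         elif first_join.get(textlist[i], n) >= i:
--             result.add(textlist[i])
--     return result
-- ===== Notes on version B (the rewrite author's own statement) =====
-- stated objective: alternative
-- what changed: Replaces A's two-index while loop with its running dealt_with set and trailing last-word clause by staged passes: precompute the keyword flags, the adjacent-keyword pair positions and a dict mapping each joined word value to its earliest pair, then classify every position independently against that precomputed map.
-- intended difference: On a one-word text whose word is a keyphrase A returns the empty set (its pair loop never runs), while B returns the set containing that lone keyword, which is the intended value since lone keywords are kept everywhere else. — e.g. on postprocessing_key_phrases(["a"], ["a"]): A returns [], B returns ["a"]
import Mathlib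
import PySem

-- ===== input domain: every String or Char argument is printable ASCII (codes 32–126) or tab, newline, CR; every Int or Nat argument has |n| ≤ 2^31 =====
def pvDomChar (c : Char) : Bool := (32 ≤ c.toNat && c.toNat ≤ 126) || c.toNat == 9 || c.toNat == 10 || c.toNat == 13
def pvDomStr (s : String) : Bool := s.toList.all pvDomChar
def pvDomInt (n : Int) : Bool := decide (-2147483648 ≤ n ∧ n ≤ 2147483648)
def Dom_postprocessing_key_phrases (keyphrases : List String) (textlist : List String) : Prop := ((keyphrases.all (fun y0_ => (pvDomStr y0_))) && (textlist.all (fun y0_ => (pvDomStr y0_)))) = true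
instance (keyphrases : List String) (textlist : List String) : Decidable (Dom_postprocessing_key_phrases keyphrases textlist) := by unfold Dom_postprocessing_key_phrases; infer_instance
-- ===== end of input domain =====

-- B replaces A's two-index pair loop with its running dealt_with set (plus last-word
-- clause) by staged passes: precomputed keyword flags, pair positions and an
-- earliest-join map, then an independent per-position classification; on a one-word
-- keyword text B keeps the lone keyword where A drops it (see D_ below).


-- ===== PORT A =====
-- A's while loop: indices i, j march together (i = j - 1); both are carried, as in the
-- Python. Indices are always in range (i < j < len), so getD's default is never read.
def pkpLoopA (keyphrases : List String) (textlist : List String) (i j : Nat)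
    (mkp dealt : PySem.Set String) : PySem.Set String :=
  if h : j < textlist.length then
    let first := textlist.getD i ""
    let second := textlist.getD j ""
    if keyphrases.contains first && keyphrases.contains second then
      pkpLoopA keyphrases textlist (i + 1) (j + 1)
        (PySem.Set.add mkp (first ++ " " ++ second))
        (PySem.Set.add (PySem.Set.add dealt first) second)
    else
      let mkp1 := if keyphrases.contains first && !(PySem.Set.contains dealt first) then
          PySem.Set.add mkp first else mkp
      let mkp2 := if (j == textlist.length - 1) && keyphrases.contains second
          && !(PySem.Set.contains dealt second) then PySem.Set.add mkp1 second else mkp1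
      pkpLoopA keyphrases textlist (i + 1) (j + 1) mkp2 dealt
  else mkp
termination_by textlist.length - j
decreasing_by all_goals omega

def postprocessing_key_phrases (keyphrases : List String) (textlist : List String) : List String :=
  pkpLoopA keyphrases textlist 0 1 PySem.Set.empty PySem.Set.empty

-- ===== PORT B =====
-- Source B's locals `flags` and `pairs`, lifted to top-level helpers.
def pkpFlags (keyphrases : List String) (textlist : List String) : List Bool :=
  textlist.map (fun w => keyphrases.contains w)

def pkpPairs (keyphrases : List String) (textlist : List String) : List Nat :=
  (List.range (textlist.length - 1)).filter (fun k =>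
    (pkpFlags keyphrases textlist).getD k false && (pkpFlags keyphrases textlist).getD (k + 1) false)

-- Source B's `first_join` dict: earliest pair position using each joined word value
def pkpFirstJoin (keyphrases : List String) (textlist : List String) : PySem.Dict String Nat :=
  (pkpPairs keyphrases textlist).foldl (fun d k =>
    PySem.Dict.setdefault (PySem.Dict.setdefault d (textlist.getD k "") k)
      (textlist.getD (k + 1) "") k) PySem.Dict.empty

-- the body of Source B's `for i in range(n)` loop
def pkpBodyB (keyphrases : List String) (textlist : List String)
    (res : PySem.Set String) (i : Nat) : PySem.Set String :=
  if !((pkpFlags keyphrases textlist).getD i false) then res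
  else if (decide (i + 1 < textlist.length)) && (pkpFlags keyphrases textlist).getD (i + 1) false then
    PySem.Set.add res (textlist.getD i "" ++ " " ++ textlist.getD (i + 1) "")
  else if decide (i ≤ PySem.Dict.getD (pkpFirstJoin keyphrases textlist) (textlist.getD i "") textlist.length) then
    PySem.Set.add res (textlist.getD i "")
  else res

def postprocessing_key_phrases_alt (keyphrases : List String) (textlist : List String) : List String :=
  (List.range textlist.length).foldl (pkpBodyB keyphrases textlist) PySem.Set.empty

-- ===== PRECONDITION & SPEC =====
-- On a one-word text whose word is a keyphrase, A returns the empty set (its pair loop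
-- never runs) while B returns the set with that lone keyword, the intended value since
-- lone keywords are kept everywhere else.
def D_postprocessing_key_phrases (keyphrases : List String) (textlist : List String) : Prop :=
  textlist.length = 1 ∧ textlist.getD 0 "" ∈ keyphrases
instance (keyphrases : List String) (textlist : List String) : Decidable (D_postprocessing_key_phrases keyphrases textlist) := by unfold D_postprocessing_key_phrases; infer_instance

def Spec_postprocessing_key_phrases (keyphrases : List String) (textlist : List String) (out : List String) : Prop := ¬ D_postprocessing_key_phrases keyphrases textlist → out = postprocessing_key_phrases_alt keyphrases textlist
instance (keyphrases : List String) (textlist : List String) (out : List String) : Decidable (Spec_postprocessing_key_phrases keyphrases textlist out) := by unfold Spec_postprocessing_key_phrases; infer_instance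

def pvDiffWitness_postprocessing_key_phrases : List String × List String := (["a"], ["a"])
def pvDiffWitnessOut_postprocessing_key_phrases : (List String) × (List String) := ([], ["a"])

-- ===== CLAIM (what is proved, stated in full; the proofs are below) =====
def Claim_unchanged_postprocessing_key_phrases : Prop := ∀ (keyphrases : List String) (textlist : List String), Dom_postprocessing_key_phrases keyphrases textlist → Spec_postprocessing_key_phrases keyphrases textlist (postprocessing_key_phrases keyphrases textlist)
def Claim_changed_postprocessing_key_phrases : Prop := Dom_postprocessing_key_phrases (pvDiffWitness_postprocessing_key_phrases.1) (pvDiffWitness_postprocessing_key_phrases.2) ∧ D_postprocessing_key_phrases (pvDiffWitness_postprocessing_key_phrases.1) (pvDiffWitness_postprocessing_key_phrases.2) ∧ postprocessing_key_phrases (pvDiffWitness_postprocessing_key_phrases.1) (pvDiffWitness_postprocessing_key_phrases.2) = pvDiffWitnessOut_postprocessing_key_phrases.1 ∧ postprocessing_key_phrases_alt (pvDiffWitness_postprocessing_key_phrases.1) (pvDiffWitness_postprocessing_key_phrases.2) = pvDiffWitnessOut_postprocessing_key_phrases.2 ∧ pvDiffWitnessOut_postprocessing_key_phrases.1 ≠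 pvDiffWitnessOut_postprocessing_key_phrases.2
def Claim_exact_postprocessing_key_phrases : Prop := ∀ (keyphrases : List String) (textlist : List String), Dom_postprocessing_key_phrases keyphrases textlist → D_postprocessing_key_phrases keyphrases textlist → postprocessing_key_phrases keyphrases textlist ≠ postprocessing_key_phrases_alt keyphrases textlist

-- ===== LEMMAS AND PROOFS =====

lemma pkpLoopA_step (kp t : List String) (i j : Nat) (mkp dealt : PySem.Set String)
    (h : j < t.length) :
    pkpLoopA kp t i j mkp dealt =
      (if kp.contains (t.getD i "") && kp.contains (t.getD j "") then
        pkpLoopA kp t (i + 1) (j + 1)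
          (PySem.Set.add mkp (t.getD i "" ++ " " ++ t.getD j ""))
          (PySem.Set.add (PySem.Set.add dealt (t.getD i "")) (t.getD j ""))
      else
        pkpLoopA kp t (i + 1) (j + 1)
          (if (j == t.length - 1) && kp.contains (t.getD j "")
              && !(PySem.Set.contains dealt (t.getD j "")) then
            PySem.Set.add (if kp.contains (t.getD i "") && !(PySem.Set.contains dealt (t.getD i "")) then
              PySem.Set.add mkp (t.getD i "") else mkp) (t.getD j "")
          else (if kp.contains (t.getD i "") && !(PySem.Set.contains dealt (t.getD i "")) then
              PySem.Set.add mkp (t.getD i "") else mkp)) dealt) := by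
  rw [pkpLoopA]
  simp only [h, dif_pos]

lemma pkpLoopA_done (kp t : List String) (i j : Nat) (mkp dealt : PySem.Set String)
    (h : ¬ j < t.length) : pkpLoopA kp t i j mkp dealt = mkp := by
  rw [pkpLoopA]; simp only [h, dif_neg, not_false_iff]

lemma flag_eq (kp t : List String) (i : Nat) (h : i < t.length) :
    (pkpFlags kp t).getD i false = kp.contains (t.getD i "") := by
  simp [pkpFlags, List.getD, List.getElem?_eq_getElem h]

lemma mem_pairs (kp t : List String) (k : Nat) :
    k ∈ pkpPairs kp t ↔
      k + 1 < t.length ∧ kp.contains (t.getD k "") = true ∧ kp.contains (t.getD (k + 1) "") = true := by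
  simp only [pkpPairs, List.mem_filter, List.mem_range, Bool.and_eq_true]
  constructor
  · rintro ⟨hk, h1, h2⟩
    have hk' : k + 1 < t.length := by omega
    rw [flag_eq kp t k (by omega), flag_eq kp t (k + 1) hk'] at *
    exact ⟨hk', h1, h2⟩
  · rintro ⟨hk, h1, h2⟩
    refine ⟨by omega, ?_, ?_⟩
    · rw [flag_eq kp t k (by omega)]; exact h1
    · rw [flag_eq kp t (k + 1) hk]; exact h2

lemma sd_get? (d : PySem.Dict String Nat) (key : String) (v : Nat) (w : String) :
    (PySem.Dict.setdefault d key v).get? w =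
      if w = key then some ((d.get? key).getD v) else d.get? w := by
  by_cases hw : w = key
  · subst hw; simp [PySem.Dict.get?_setdefault_self]
  · rw [if_neg hw]
    by_cases hc : d.contains key = true
    · rw [PySem.Dict.setdefault_of_contains d v hc]
    · have hc' : d.contains key = false := by simpa using hc
      rw [PySem.Dict.setdefault_of_not_contains d v hc', PySem.Dict.get?_insert_of_ne d v hw]

lemma sd2_get? (t : List String) (d : PySem.Dict String Nat) (k : Nat) (w : String) :
    ((d.setdefault (t.getD k "") k).setdefault (t.getD (k + 1) "") k).get? w
      = match d.get? w with
        | some v => some v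
        | none => if (t.getD k "" == w || t.getD (k + 1) "" == w) then some k else none := by
  rw [sd_get?, sd_get?, sd_get?]
  by_cases h1 : w = t.getD (k + 1) "" <;> by_cases h2 : w = t.getD k ""
  · have e : t.getD (k + 1) "" = t.getD k "" := h1.symm.trans h2
    rw [if_pos h1, if_pos e, ← h2]
    cases hd : d.get? w <;> simp
  · have e : ¬ t.getD (k + 1) "" = t.getD k "" := fun he => h2 (h1.trans he)
    rw [if_pos h1, if_neg e, ← h1]
    cases hd : d.get? w <;> simp
  · rw [if_neg h1, if_pos h2, ← h2]
    cases hd : d.get? w <;> simp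
  · rw [if_neg h1, if_neg h2]
    cases hd : d.get? w with
    | some v => simp
    | none =>
      simp
      exact ⟨fun he => h2 he.symm, fun he => h1 he.symm⟩

lemma fj_get? (kp t : List String) (w : String) :
    (pkpFirstJoin kp t).get? w =
      (pkpPairs kp t).find? (fun k => t.getD k "" == w || t.getD (k + 1) "" == w) := by
  suffices h : ∀ (l : List Nat) (d : PySem.Dict String Nat),
      (l.foldl (fun d k => PySem.Dict.setdefault (PySem.Dict.setdefault d (t.getD k "") k)
          (t.getD (k + 1) "") k) d).get? w
        = match d.get? w with
          | some v => some v
          | none => l.find? (fun k => t.getD k "" == w || t.getD (k + 1) "" == w) by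
    have := h (pkpPairs kp t) PySem.Dict.empty
    simpa [pkpFirstJoin, PySem.Dict.get?_empty] using this
  intro l
  induction l with
  | nil => intro d; cases hd : d.get? w <;> simp [hd]
  | cons k l ih =>
    intro d
    rw [List.foldl_cons, ih, sd2_get?]
    cases hd : d.get? w with
    | some v => simp
    | none =>
      rw [List.find?_cons]
      cases hp : (t.getD k "" == w || t.getD (k + 1) "" == w) with
      | false => simp
      | true => simp

lemma find?_sorted_min (p : Nat → Bool) :
    ∀ (l : List Nat), l.Pairwise (· < ·) → ∀ (k0 : Nat), l.find? p = some k0 →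
      ∀ k ∈ l, p k = true → k0 ≤ k := by
  intro l
  induction l with
  | nil => intro _ k0 hf; simp at hf
  | cons a l ih =>
    intro hs k0 hf k hk hp
    rw [List.find?_cons] at hf
    rcases List.pairwise_cons.mp hs with ⟨ha, hs'⟩
    cases hpa : p a with
    | true =>
      rw [hpa] at hf; simp at hf; subst hf
      rcases List.mem_cons.mp hk with rfl | hk'
      · exact le_refl _
      · exact le_of_lt (ha k hk')
    | false =>
      rw [hpa] at hf; simp at hf
      rcases List.mem_cons.mp hk with rfl | hk'
      · rw [hpa] at hp; exact absurd hp (by simp)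
      · exact ih hs' k0 hf k hk' hp

lemma pairs_sorted (kp t : List String) : (pkpPairs kp t).Pairwise (· < ·) :=
  (List.pairwise_lt_range).filter _

-- B's `first_join.get(textlist[i], n) >= i` test, as a proposition
lemma cond_iff (kp t : List String) (i : Nat) (hi : i ≤ t.length) :
    (decide (i ≤ PySem.Dict.getD (pkpFirstJoin kp t) (t.getD i "") t.length)) = true ↔
      ¬ ∃ k, k ∈ pkpPairs kp t ∧ k < i ∧ (t.getD k "" = t.getD i "" ∨ t.getD (k + 1) "" = t.getD i "") := by
  rw [PySem.Dict.getD_eq_get?_getD, fj_get? kp t (t.getD i "")]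
  constructor
  · intro h hE
    obtain ⟨k, hk, hlt, hor⟩ := hE
    have hp : (t.getD k "" == t.getD i "" || t.getD (k + 1) "" == t.getD i "") = true := by
      simp only [Bool.or_eq_true, beq_iff_eq]
      exact hor
    cases hf : (pkpPairs kp t).find?
        (fun k => t.getD k "" == t.getD i "" || t.getD (k + 1) "" == t.getD i "") with
    | none => exact absurd hp (by simpa using List.find?_eq_none.mp hf k hk)
    | some k0 =>
      have hmin := find?_sorted_min _ _ (pairs_sorted kp t) k0 hf k hk hp
      rw [hf] at h
      simp at h
      omega
  · intro hE
    cases hf : (pkpPairs kp t).find?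
        (fun k => t.getD k "" == t.getD i "" || t.getD (k + 1) "" == t.getD i "") with
    | none => simpa using hi
    | some k0 =>
      have hk0mem := List.mem_of_find?_eq_some hf
      have hp0 := List.find?_some hf
      have hor : t.getD k0 "" = t.getD i "" ∨ t.getD (k0 + 1) "" = t.getD i "" := by
        simpa using hp0
      have hni : ¬ k0 < i := fun hlt => hE ⟨k0, hk0mem, hlt, hor⟩
      simp
      omega

-- the invariant relating A's dealt_with set to B's precomputed pair list
def pkpInv (kp t : List String) (i : Nat) (dealt : PySem.Set String) : Prop :=
  ∀ w, PySem.Set.contains dealt w = true ↔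
    ∃ k, k ∈ pkpPairs kp t ∧ k < i ∧ (t.getD k "" = w ∨ t.getD (k + 1) "" = w)

-- A's loop from an aligned position equals B's fold over the remaining indices
lemma loops_eq (kp t : List String) :
    ∀ (fuel i : Nat) (res dealt : PySem.Set String),
      i + 2 + fuel = t.length → pkpInv kp t i dealt →
      pkpLoopA kp t i (i + 1) res dealt =
        (List.range' i (t.length - i)).foldl (pkpBodyB kp t) res := by
  intro fuel
  induction fuel with
  | zero =>
    intro i res dealt hlen hinv
    have hi1 : i + 1 < t.length := by omega
    have hi : i < t.length := by omega
    have hrange : t.length - i = 2 := by omega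
    rw [hrange, List.range'_succ, List.range'_succ, List.range'_zero]
    rw [pkpLoopA_step kp t i (i + 1) res dealt hi1]
    rw [pkpLoopA_done kp t (i + 1) (i + 1 + 1) _ _ (by omega)]
    rw [pkpLoopA_done kp t (i + 1) (i + 1 + 1) _ _ (by omega)]
    simp only [List.foldl_cons, List.foldl_nil]
    have hbeq : ((i + 1 : Nat) == t.length - 1) = true := by simp; omega
    by_cases ha : kp.contains (t.getD i "") = true <;>
      by_cases hb : kp.contains (t.getD (i + 1) "") = true
    · -- pair at i
      have hmemp : i ∈ pkpPairs kp t := (mem_pairs kp t i).mpr ⟨hi1, ha, hb⟩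
      have hall : (decide (i + 1 ≤ PySem.Dict.getD (pkpFirstJoin kp t) (t.getD (i + 1) "") t.length)) = false := by
        rw [Bool.eq_false_iff]
        intro hc
        exact (cond_iff kp t (i + 1) (by omega)).mp hc ⟨i, hmemp, by omega, Or.inr rfl⟩
      simp only [pkpBodyB, flag_eq kp t i hi, flag_eq kp t (i + 1) hi1, ha, hb,
        Bool.and_self, if_true, Bool.not_true, Bool.false_eq_true, if_false,
        decide_eq_true_eq, hi1, Bool.true_and,
        (by simp; omega : (decide (i + 1 + 1 < t.length)) = false), Bool.false_and, hall]
      simp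
    · -- i keyword, i+1 not: possible single at i, nothing at i+1
      simp only [pkpBodyB, flag_eq kp t i hi, flag_eq kp t (i + 1) hi1, ha, hb,
        Bool.and_false, Bool.false_eq_true, if_false, hbeq, Bool.true_and, Bool.false_and,
        Bool.not_true, Bool.not_false, if_true,
        (by simp [hi1] : (decide (i + 1 < t.length)) = true)]
      by_cases hE : ∃ k, k ∈ pkpPairs kp t ∧ k < i ∧ (t.getD k "" = t.getD i "" ∨ t.getD (k + 1) "" = t.getD i "")
      · have hc : PySem.Set.contains dealt (t.getD i "") = true := (hinv _).mpr hE
        have hall : (decide (i ≤ PySem.Dict.getD (pkpFirstJoin kp t) (t.getD i "") t.length)) = false := by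
          rw [Bool.eq_false_iff]; intro hc'; exact (cond_iff kp t i (by omega)).mp hc' hE
        rw [hc, hall]
        simp
      · have hc : PySem.Set.contains dealt (t.getD i "") = false :=
          Bool.eq_false_iff.mpr (fun h => hE ((hinv _).mp h))
        have hall : (decide (i ≤ PySem.Dict.getD (pkpFirstJoin kp t) (t.getD i "") t.length)) = true :=
          (cond_iff kp t i (by omega)).mpr hE
        rw [hc, hall]
        simp
    · -- i not keyword, i+1 keyword: A's last-word clause vs B's step at i+1
      simp only [pkpBodyB, flag_eq kp t i hi, flag_eq kp t (i + 1) hi1, ha, hb,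
        Bool.false_and, Bool.false_eq_true, if_false, hbeq, Bool.true_and,
        Bool.not_false, if_true,
        (by simp; omega : (decide (i + 1 + 1 < t.length)) = false)]
      have hstep : ∀ w, (∃ k, k ∈ pkpPairs kp t ∧ k < i + 1 ∧ (t.getD k "" = w ∨ t.getD (k + 1) "" = w)) ↔
          (∃ k, k ∈ pkpPairs kp t ∧ k < i ∧ (t.getD k "" = w ∨ t.getD (k + 1) "" = w)) := by
        intro w
        constructor
        · rintro ⟨k, hk, hlt, hor⟩
          rcases Nat.lt_succ_iff_lt_or_eq.mp hlt with h | rfl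
          · exact ⟨k, hk, h, hor⟩
          · exact absurd ((mem_pairs kp t k).mp hk).2.1 ha
        · rintro ⟨k, hk, hlt, hor⟩; exact ⟨k, hk, by omega, hor⟩
      by_cases hE : ∃ k, k ∈ pkpPairs kp t ∧ k < i ∧ (t.getD k "" = t.getD (i + 1) "" ∨ t.getD (k + 1) "" = t.getD (i + 1) "")
      · have hc : PySem.Set.contains dealt (t.getD (i + 1) "") = true := (hinv _).mpr hE
        have hall : (decide (i + 1 ≤ PySem.Dict.getD (pkpFirstJoin kp t) (t.getD (i + 1) "") t.length)) = false := by
          rw [Bool.eq_false_iff]; intro hc'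
          exact (cond_iff kp t (i + 1) (by omega)).mp hc' ((hstep _).mpr hE)
        rw [hc, hall]
        simp
      · have hc : PySem.Set.contains dealt (t.getD (i + 1) "") = false :=
          Bool.eq_false_iff.mpr (fun h => hE ((hinv _).mp h))
        have hall : (decide (i + 1 ≤ PySem.Dict.getD (pkpFirstJoin kp t) (t.getD (i + 1) "") t.length)) = true :=
          (cond_iff kp t (i + 1) (by omega)).mpr (fun h => hE ((hstep _).mp h))
        rw [hc, hall]
        simp
    · -- neither keyword
      simp only [pkpBodyB, flag_eq kp t i hi, flag_eq kp t (i + 1) hi1, ha, hb,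
        Bool.false_and, Bool.and_false, Bool.false_eq_true, if_false, Bool.not_false, if_true]
  | succ fuel ih =>
    intro i res dealt hlen hinv
    have hi1 : i + 1 < t.length := by omega
    have hi : i < t.length := by omega
    have hbeq : ((i + 1 : Nat) == t.length - 1) = false := by simp; omega
    have hrange : t.length - i = (t.length - (i + 1)) + 1 := by omega
    rw [hrange, List.range'_succ, List.foldl_cons]
    rw [pkpLoopA_step kp t i (i + 1) res dealt hi1]
    by_cases ha : kp.contains (t.getD i "") = true <;>
      by_cases hb : kp.contains (t.getD (i + 1) "") = true
    · -- pair at i: both add the bigram; extend the invariant with the two joined words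
      have hmemp : i ∈ pkpPairs kp t := (mem_pairs kp t i).mpr ⟨hi1, ha, hb⟩
      have hinv' : pkpInv kp t (i + 1)
          (PySem.Set.add (PySem.Set.add dealt (t.getD i "")) (t.getD (i + 1) "")) := by
        intro w
        rw [PySem.Set.contains_iff, PySem.Set.mem_add, PySem.Set.mem_add,
          ← PySem.Set.contains_iff, hinv w]
        constructor
        · rintro ((⟨k, hk, hlt, hor⟩ | rfl) | rfl)
          · exact ⟨k, hk, by omega, hor⟩
          · exact ⟨i, hmemp, by omega, Or.inl rfl⟩
          · exact ⟨i, hmemp, by omega, Or.inr rfl⟩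
        · rintro ⟨k, hk, hlt, hor⟩
          rcases Nat.lt_succ_iff_lt_or_eq.mp hlt with h | rfl
          · exact Or.inl (Or.inl ⟨k, hk, h, hor⟩)
          · rcases hor with h | h
            · exact Or.inl (Or.inr h.symm)
            · exact Or.inr h.symm
      rw [ih (i + 1) _ _ (by omega) hinv']
      simp only [pkpBodyB, flag_eq kp t i hi, flag_eq kp t (i + 1) hi1, ha, hb,
        Bool.and_self, if_true, Bool.not_true, Bool.false_eq_true, if_false,
        (by simp [hi1] : (decide (i + 1 < t.length)) = true), Bool.true_and]
    · -- i keyword, i+1 not: possible single at i; dealt unchanged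
      have hnp : ¬ i ∈ pkpPairs kp t := fun h => hb ((mem_pairs kp t i).mp h).2.2
      have hinv' : pkpInv kp t (i + 1) dealt := by
        intro w
        rw [hinv w]
        constructor
        · rintro ⟨k, hk, hlt, hor⟩; exact ⟨k, hk, by omega, hor⟩
        · rintro ⟨k, hk, hlt, hor⟩
          rcases Nat.lt_succ_iff_lt_or_eq.mp hlt with h | rfl
          · exact ⟨k, hk, h, hor⟩
          · exact absurd hk hnp
      rw [ih (i + 1) _ _ (by omega) hinv']
      simp only [pkpBodyB, flag_eq kp t i hi, flag_eq kp t (i + 1) hi1, ha, hb,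
        Bool.and_false, Bool.false_eq_true, if_false, hbeq, Bool.false_and, Bool.not_true,
        (by simp [hi1] : (decide (i + 1 < t.length)) = true), Bool.true_and]
      by_cases hE : ∃ k, k ∈ pkpPairs kp t ∧ k < i ∧ (t.getD k "" = t.getD i "" ∨ t.getD (k + 1) "" = t.getD i "")
      · have hc : PySem.Set.contains dealt (t.getD i "") = true := (hinv _).mpr hE
        have hall : (decide (i ≤ PySem.Dict.getD (pkpFirstJoin kp t) (t.getD i "") t.length)) = false := by
          rw [Bool.eq_false_iff]; intro hc'; exact (cond_iff kp t i (by omega)).mp hc' hE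
        rw [hc, hall]
        simp
      · have hc : PySem.Set.contains dealt (t.getD i "") = false :=
          Bool.eq_false_iff.mpr (fun h => hE ((hinv _).mp h))
        have hall : (decide (i ≤ PySem.Dict.getD (pkpFirstJoin kp t) (t.getD i "") t.length)) = true :=
          (cond_iff kp t i (by omega)).mpr hE
        rw [hc, hall]
        simp
    · -- i not keyword: A adds nothing this iteration (last-word clause off: beq false)
      have hnp : ¬ i ∈ pkpPairs kp t := fun h => ha ((mem_pairs kp t i).mp h).2.1
      have hinv' : pkpInv kp t (i + 1) dealt := by
        intro w
        rw [hinv w]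
        constructor
        · rintro ⟨k, hk, hlt, hor⟩; exact ⟨k, hk, by omega, hor⟩
        · rintro ⟨k, hk, hlt, hor⟩
          rcases Nat.lt_succ_iff_lt_or_eq.mp hlt with h | rfl
          · exact ⟨k, hk, h, hor⟩
          · exact absurd hk hnp
      rw [ih (i + 1) _ _ (by omega) hinv']
      simp only [pkpBodyB, flag_eq kp t i hi, ha, hb, Bool.false_and,
        Bool.false_eq_true, if_false, hbeq, Bool.not_false, if_true]
    · -- neither keyword
      have hnp : ¬ i ∈ pkpPairs kp t := fun h => ha ((mem_pairs kp t i).mp h).2.1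
      have hinv' : pkpInv kp t (i + 1) dealt := by
        intro w
        rw [hinv w]
        constructor
        · rintro ⟨k, hk, hlt, hor⟩; exact ⟨k, hk, by omega, hor⟩
        · rintro ⟨k, hk, hlt, hor⟩
          rcases Nat.lt_succ_iff_lt_or_eq.mp hlt with h | rfl
          · exact ⟨k, hk, h, hor⟩
          · exact absurd hk hnp
      rw [ih (i + 1) _ _ (by omega) hinv']
      simp only [pkpBodyB, flag_eq kp t i hi, ha, hb, Bool.false_and, Bool.and_false,
        Bool.false_eq_true, if_false, hbeq, Bool.not_false, if_true]

-- ===== VERDICT (by name: the statement is the Claim_ definition above) =====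
theorem postprocessing_key_phrases_spec : Claim_unchanged_postprocessing_key_phrases := by
  intro kp t _hdom hnd
  show postprocessing_key_phrases kp t = postprocessing_key_phrases_alt kp t
  unfold postprocessing_key_phrases postprocessing_key_phrases_alt
  rw [List.range_eq_range']
  match t with
  | [] =>
    rw [pkpLoopA_done kp [] 0 1 _ _ (by simp)]
    simp
  | [w] =>
    have hw : ¬ w ∈ kp := fun hmem => hnd ⟨rfl, by simpa using hmem⟩
    have hw' : kp.contains w = false := by simpa using hw
    rw [pkpLoopA_done kp [w] 0 1 _ _ (by simp)]
    simp only [List.length_cons, List.length_nil, List.range'_succ, List.range'_zero,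
      List.foldl_cons, List.foldl_nil]
    simp [pkpBodyB, pkpFlags, hw]
  | w1 :: w2 :: rest =>
    have h0 : (0 : Nat) + 2 + rest.length = (w1 :: w2 :: rest).length := by simp; omega
    have hinv0 : pkpInv kp (w1 :: w2 :: rest) 0 PySem.Set.empty := by
      intro w
      constructor
      · intro h; simp [PySem.Set.contains, PySem.Set.empty] at h
      · rintro ⟨k, _, hlt, _⟩; omega
    have := loops_eq kp (w1 :: w2 :: rest) rest.length 0 PySem.Set.empty PySem.Set.empty h0 hinv0
    simpa using this

theorem postprocessing_key_phrases_changed : Claim_changed_postprocessing_key_phrases := by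
  unfold Claim_changed_postprocessing_key_phrases
  refine ⟨by decide, by decide, ?_, by decide, by decide⟩
  show postprocessing_key_phrases ["a"] ["a"] = []
  unfold postprocessing_key_phrases
  rw [pkpLoopA_done ["a"] ["a"] 0 1 _ _ (by decide)]
  rfl

theorem postprocessing_key_phrases_tight : Claim_exact_postprocessing_key_phrases := by
  intro kp t _hdom hD
  obtain ⟨hlen, hmem⟩ := hD
  match t, hlen with
  | [w], _ =>
    have hw : kp.contains w = true := by simpa using hmem
    unfold postprocessing_key_phrases postprocessing_key_phrases_alt
    rw [pkpLoopA_done kp [w] 0 1 _ _ (by simp)]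
    rw [List.range_eq_range']
    simp only [List.length_cons, List.length_nil, List.range'_succ, List.range'_zero,
      List.foldl_cons, List.foldl_nil]
    have hmem' : w ∈ kp := by simpa using hmem
    simp [pkpBodyB, pkpPairs, pkpFlags, pkpFirstJoin, hmem', PySem.Set.add,
      PySem.Set.empty, PySem.Set.contains, PySem.Dict.getD_empty]
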